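-- pv_equiv track=rewrite | github.com/volcengine/veScale | vescale/dtensor/vescale_utils/ragged_shard_utils.py | flatten_index
-- ===== SOURCE A (Python) =====
-- from typing import List, Tuple, Sequence
--
-- def flatten_index(index: Tuple[int, ...], shape: Tuple[int, ...]) -> int:
--     """
--     Convert an N-dimensional index into a single flattened index assuming the
--     tensor is stored in **row-major (C-contiguous)** memory layout.
--
--     Args:
--         index: Tuple of integer indices (i0, i1, ..., i{N-1}) for each dimension.
--         shape: Tuple of sizes for each dimension (s0, s1, ..., s{N-1}).
--
--     Returns:
--         The corresponding 0-based flattened index.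
--
--     Raises:
--         ValueError: If `index` and `shape` lengths don't match.
--         IndexError: If any index is out of bounds for its dimension.
--
--     Notes:
--         The implementation walks the dimensions from last to first, accumulating
--         the stride (product of later dimension sizes) to compute:
--             flat = i0 * (s1*s2*...) + i1 * (s2*...) + ... + i{N-1}.
--     """
--     if len(shape) != len(index):
--         raise ValueError(f"Shape length {len(shape)} and index length {len(index)} must match")
--
--     flat_index = 0
--     stride = 1
--     for s, i in zip(reversed(shape), reversed(index)):
--         if not (0 <= i < s):
--             raise IndexError(f"Index {i} out of bounds for dimension size {s}")
--         flat_index += i * stride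
--         stride *= s
--
--     return flat_index
-- ===== SOURCE B (Python) =====
-- def flatten_index(index, shape):
--     """Row-major flatten via Horner's method: one forward pass, no stride variable."""
--     if len(shape) != len(index):
--         raise ValueError(f"Shape length {len(shape)} and index length {len(index)} must match")
--     flat = 0
--     for i, s in zip(index, shape):
--         if not (0 <= i < s):
--             raise IndexError(f"Index {i} out of bounds for dimension size {s}")
--         flat = flat * s + i
--     return flat
-- ===== Notes on version B (the rewrite author's own statement) =====
-- stated objective: simpler
-- what changed: Replaces the backward stride-accumulating loop with a single forward Horner fold (acc = acc*s + i) that keeps no stride variable.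
import Mathlib
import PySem

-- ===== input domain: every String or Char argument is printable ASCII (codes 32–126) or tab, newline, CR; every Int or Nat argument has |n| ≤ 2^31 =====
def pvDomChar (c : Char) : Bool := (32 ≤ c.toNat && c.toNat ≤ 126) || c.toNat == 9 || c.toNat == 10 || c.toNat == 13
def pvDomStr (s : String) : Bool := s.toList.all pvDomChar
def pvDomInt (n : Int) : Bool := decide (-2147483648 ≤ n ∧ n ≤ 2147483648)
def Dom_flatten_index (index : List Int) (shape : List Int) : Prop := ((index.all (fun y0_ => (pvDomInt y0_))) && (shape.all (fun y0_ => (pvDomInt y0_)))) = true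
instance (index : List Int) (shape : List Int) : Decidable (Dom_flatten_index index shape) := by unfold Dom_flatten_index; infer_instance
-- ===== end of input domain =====

-- B replaces A's backward stride-accumulating loop by a single forward Horner fold (acc = acc*s + i); same O(n) cost, simpler.


-- ===== PORT A =====
-- A: walk dimensions last-to-first keeping (flat_index, stride); the length-mismatch
-- ValueError and the out-of-bounds IndexError are exactly the inputs excluded by Pre_.
def flatten_index (index : List Int) (shape : List Int) : Int :=
  (((shape.reverse).zip (index.reverse)).foldl
    (fun (st : Int × Int) (p : Int × Int) => (st.1 + p.2 * st.2, st.2 * p.1)) (0, 1)).1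

-- ===== PORT B =====
-- B: forward Horner fold, no stride variable (raises excluded by Pre_ as in A).
def flatten_index_alt (index : List Int) (shape : List Int) : Int :=
  (index.zip shape).foldl (fun acc (p : Int × Int) => acc * p.2 + p.1) 0

-- ===== PRECONDITION & SPEC =====
-- Pre_ excludes exactly the inputs where A raises: length mismatch (ValueError)
-- or some index out of bounds for its dimension (IndexError).
def Pre_flatten_index (index : List Int) (shape : List Int) : Prop :=
  index.length = shape.length ∧ ∀ p ∈ index.zip shape, 0 ≤ p.1 ∧ p.1 < p.2
instance (index : List Int) (shape : List Int) : Decidable (Pre_flatten_index index shape) := by unfold Pre_flatten_index; infer_instance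
def pvWitness_flatten_index : List Int × List Int := ([1, 2, 0], [3, 4, 2])

def Spec_flatten_index (index : List Int) (shape : List Int) (out : Int) : Prop := out = flatten_index_alt index shape
instance (index : List Int) (shape : List Int) (out : Int) : Decidable (Spec_flatten_index index shape out) := by unfold Spec_flatten_index; infer_instance

-- ===== CLAIM (what is proved, stated in full; the proofs are below) =====
def Claim_equal_flatten_index : Prop := ∀ (index : List Int) (shape : List Int), Dom_flatten_index index shape → Pre_flatten_index index shape → Spec_flatten_index index shape (flatten_index index shape)

-- ===== LEMMAS AND PROOFS =====

-- Horner fold with a general initial accumulator.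
lemma horner_init (l : List (Int × Int)) (a : Int) :
    l.foldl (fun acc (p : Int × Int) => acc * p.2 + p.1) a
      = a * (l.map Prod.snd).prod + l.foldl (fun acc (p : Int × Int) => acc * p.2 + p.1) 0 := by
  induction l generalizing a with
  | nil => simp
  | cons p t ih =>
    simp only [List.foldl_cons, List.map_cons, List.prod_cons]
    rw [ih (a * p.2 + p.1), ih (0 * p.2 + p.1)]
    ring

-- A's backward (flat, stride) fold computed in terms of B's forward Horner fold.
lemma afold_eq (is ss : List Int) (h : is.length = ss.length) (f st : Int) :
    ((ss.reverse).zip (is.reverse)).foldl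
        (fun (q : Int × Int) (p : Int × Int) => (q.1 + p.2 * q.2, q.2 * p.1)) (f, st)
      = (f + ((is.zip ss).foldl (fun acc (p : Int × Int) => acc * p.2 + p.1) 0) * st,
         st * ss.prod) := by
  induction is generalizing ss f st with
  | nil =>
    have : ss = [] := by simpa using h.symm
    subst this; simp
  | cons i it ih =>
    cases ss with
    | nil => simp at h
    | cons s st' =>
      have hlen : it.length = st'.length := by simpa using h
      have hz : (st'.reverse ++ [s]).zip (it.reverse ++ [i])
          = (st'.reverse.zip it.reverse) ++ [(s, i)] := by
        apply List.zip_append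
        simp [hlen]
      simp only [List.reverse_cons, hz, List.foldl_append, List.foldl_cons, List.foldl_nil,
        ih st' hlen f st, List.zip_cons_cons, List.prod_cons]
      rw [horner_init (it.zip st') (0 * s + i),
        List.map_snd_zip (le_of_eq hlen.symm)]
      exact Prod.ext (by ring) (by ring)

-- ===== VERDICT (by name: the statement is the Claim_ definition above) =====
theorem flatten_index_spec : Claim_equal_flatten_index := by
  intro index shape _ hpre
  unfold Spec_flatten_index flatten_index flatten_index_alt
  rw [afold_eq index shape hpre.1 0 1]
  ring
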